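-- pv_equiv track=rewrite | github.com/MrDeners/IGI | IGI/LR3/tasks/task_four.py | get_longest_word_final_e
-- ===== SOURCE A (Python) =====
-- def get_longest_word_final_e(words):
--     # This function finds the longest word in the input list of words that ends with 'e'
--     searching_word = ""
--     for word in words:
--         if word[-1] == 'e':
--             if len(word) > len(searching_word):
--                 searching_word = word
--         elif word[-1] in [',', '.', '?', '!']:
--             if word[-2] == 'e':
--                 if len(word) > len(searching_word):
--                     searching_word = word
--
--     if searching_word == "":
--         return "Not Found"
--
--     return searching_word
-- ===== SOURCE B (Python) =====
-- def get_longest_word_final_e(words):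
--     # Sort longest-first (stable, so original order breaks length ties),
--     # then return the first word that ends in 'e' (optionally before one
--     # trailing punctuation mark).
--     for w in sorted(words, key=len, reverse=True):
--         if w[-1] == 'e' or (w[-1] in (',', '.', '?', '!') and w[-2] == 'e'):
--             return w
--     return "Not Found"
-- ===== Notes on version B (the rewrite author's own statement) =====
-- stated objective: alternative
-- what changed: Replaces the running-max accumulator scan with sort-then-scan: stable-sort the words longest-first and return the first qualifying word (stability makes the first match equal A's first-longest tie-break).
import Mathlib
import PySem

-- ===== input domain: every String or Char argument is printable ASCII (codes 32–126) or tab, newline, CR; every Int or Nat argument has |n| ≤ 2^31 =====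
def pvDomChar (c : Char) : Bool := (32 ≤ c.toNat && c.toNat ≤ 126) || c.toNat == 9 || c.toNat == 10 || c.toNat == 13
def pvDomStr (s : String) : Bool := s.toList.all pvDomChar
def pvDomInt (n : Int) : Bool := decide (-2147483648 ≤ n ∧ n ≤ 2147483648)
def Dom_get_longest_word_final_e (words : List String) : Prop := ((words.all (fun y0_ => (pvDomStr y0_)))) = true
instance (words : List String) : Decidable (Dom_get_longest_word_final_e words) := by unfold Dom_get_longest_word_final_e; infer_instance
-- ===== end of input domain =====

-- B replaces A's running-max accumulator scan by a stable longest-first sort followed by a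
-- first-match scan (objective: alternative algorithm; not claimed faster).

-- ===== PORT A =====
def get_longest_word_final_e (words : List String) : String :=
  let searching_word :=
    words.foldl (fun searching_word word =>
      if (PySem.Str.pyGet? word (-1)).getD ' ' = 'e' then
        if PySem.Str.len word > PySem.Str.len searching_word then word else searching_word
      else if ((PySem.Str.pyGet? word (-1)).getD ' ') ∈ [',', '.', '?', '!'] then
        if (PySem.Str.pyGet? word (-2)).getD ' ' = 'e' then
          if PySem.Str.len word > PySem.Str.len searching_word then word else searching_word
        else searching_word
      else searching_word) ""
  if searching_word = "" then "Not Found" else searching_word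

-- ===== PORT B =====
-- B's loop condition: w[-1] == 'e' or (w[-1] in (',','.','?','!') and w[-2] == 'e')
def pvQualifies (w : String) : Bool :=
  decide ((PySem.Str.pyGet? w (-1)).getD ' ' = 'e') ||
    (decide (((PySem.Str.pyGet? w (-1)).getD ' ') ∈ [',', '.', '?', '!']) &&
      decide ((PySem.Str.pyGet? w (-2)).getD ' ' = 'e'))

def get_longest_word_final_e_alt (words : List String) : String :=
  match (PySem.List.sorted words PySem.Str.len true).find? pvQualifies with
  | some w => w
  | none => "Not Found"

-- ===== PRECONDITION & SPEC =====
-- Pre_ excludes exactly the inputs on which the Python A raises IndexError: an empty word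
-- (word[-1]) or a length-1 word whose only character is ',', '.', '?' or '!' (word[-2]).
def Pre_get_longest_word_final_e (words : List String) : Prop :=
  ∀ w ∈ words, w.toList ≠ [] ∧
    (w.toList.getLast? ∈ [some ',', some '.', some '?', some '!'] → 2 ≤ w.toList.length)
instance (words : List String) : Decidable (Pre_get_longest_word_final_e words) := by
  unfold Pre_get_longest_word_final_e; infer_instance
def pvWitness_get_longest_word_final_e : List String := ["apple", "tree,", "cat"]

def Spec_get_longest_word_final_e (words : List String) (out : String) : Prop := out = get_longest_word_final_e_alt words
instance (words : List String) (out : String) : Decidable (Spec_get_longest_word_final_e words out) := by unfold Spec_get_longest_word_final_e; infer_instance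

-- ===== CLAIM (what is proved, stated in full; the proofs are below) =====
def Claim_equal_get_longest_word_final_e : Prop := ∀ (words : List String), Dom_get_longest_word_final_e words → Pre_get_longest_word_final_e words → Spec_get_longest_word_final_e words (get_longest_word_final_e words)

-- ===== LEMMAS AND PROOFS =====

-- A's loop body, as a named step function.
def pvStepA (sw w : String) : String :=
  if (PySem.Str.pyGet? w (-1)).getD ' ' = 'e' then
    if PySem.Str.len w > PySem.Str.len sw then w else sw
  else if ((PySem.Str.pyGet? w (-1)).getD ' ') ∈ [',', '.', '?', '!'] then
    if (PySem.Str.pyGet? w (-2)).getD ' ' = 'e' then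
      if PySem.Str.len w > PySem.Str.len sw then w else sw
    else sw
  else sw

-- First-longest as an option-valued step (bridge between the two programs).
def pvStepB (acc : Option String) (w : String) : Option String :=
  if pvQualifies w then
    match acc with
    | none => some w
    | some m => if PySem.Str.len m < PySem.Str.len w then some w else some m
  else acc

-- A's step is: replace iff the word qualifies and is strictly longer.
theorem pvStepA_eq (sw w : String) :
    pvStepA sw w = if pvQualifies w then (if PySem.Str.len sw < PySem.Str.len w then w else sw) else sw := by
  unfold pvStepA pvQualifies
  split_ifs <;> simp_all

-- A qualifying word is nonempty, hence has positive length.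
theorem pvQualifies_len {w : String} (h : pvQualifies w = true) : 0 < PySem.Str.len w := by
  rcases hc : w.toList with _ | ⟨c, t⟩
  · exfalso
    simp [pvQualifies, PySem.Str.pyGet?, PySem.List.pyGet?, hc] at h
  · simp [PySem.Str.len_eq, hc]

theorem len_empty : PySem.Str.len "" = 0 := by decide

-- Inserting x into a length-descending list commutes find? with the first-longest step.
theorem find_insertBy (x : String) (l : List String)
    (hl : l.Pairwise (fun a b => PySem.Str.len b ≤ PySem.Str.len a)) :
    (PySem.List.insertBy (fun a b => decide (PySem.Str.len b < PySem.Str.len a)) x l).find? pvQualifies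
      = pvStepB (l.find? pvQualifies) x := by
  induction l with
  | nil =>
    by_cases h : pvQualifies x <;> simp [PySem.List.insertBy, pvStepB, List.find?, h]
  | cons b t ih =>
    rcases List.pairwise_cons.mp hl with ⟨hb, ht⟩
    simp only [PySem.List.insertBy]
    by_cases hbef : PySem.Str.len b < PySem.Str.len x
    · simp only [hbef, decide_true, if_true]
      by_cases hq : pvQualifies x
      · cases hf : (b :: t).find? pvQualifies with
        | none => simp [List.find?, hq, pvStepB, hf]
        | some m =>
          have hm : m ∈ b :: t := List.mem_of_find?_eq_some hf
          have hlm : PySem.Str.len m ≤ PySem.Str.len b := by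
            rcases List.mem_cons.mp hm with rfl | hmt
            · exact le_rfl
            · exact hb m hmt
          have hlt : PySem.Str.len m < PySem.Str.len x := lt_of_le_of_lt hlm hbef
          have hsx : pvStepB (some m) x = some x := by
            unfold pvStepB
            rw [if_pos hq]
            show (if PySem.Str.len m < PySem.Str.len x then some x else some m) = some x
            rw [if_pos hlt]
          rw [hsx]
          simp [List.find?, hq]
      · simp [List.find?, hq, pvStepB]
    · simp only [hbef, decide_false, Bool.false_eq_true, if_false]
      by_cases hqb : pvQualifies b
      · have hsb : pvStepB (some b) x = some b := by
          unfold pvStepB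
          by_cases hqx : pvQualifies x
          · rw [if_pos hqx]
            show (if PySem.Str.len b < PySem.Str.len x then some x else some b) = some b
            rw [if_neg hbef]
          · rw [if_neg hqx]
        have hfb : (b :: t).find? pvQualifies = some b := by simp [List.find?, hqb]
        rw [hfb, hsb]
        simp [List.find?, hqb]
      · simp only [List.find?, hqb, Bool.false_eq_true, if_false]
        exact ih ht

-- B's sorted-then-find scan equals the fused first-longest fold over the original list.
theorem sorted_find_eq_foldB (xs : List String) :
    (PySem.List.sorted xs PySem.Str.len true).find? pvQualifies = xs.foldl pvStepB none := by
  induction xs using List.reverseRecOn with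
  | nil => rfl
  | append_singleton xs x ih =>
    rw [PySem.List.sorted_rev_eq_foldl_insertBy, List.foldl_append, List.foldl_append,
        ← PySem.List.sorted_rev_eq_foldl_insertBy]
    simp only [List.foldl_cons, List.foldl_nil]
    rw [find_insertBy x _ (PySem.List.sorted_pairwise_rev xs PySem.Str.len), ih]

-- From a some-state, A's fold and the fused fold move in lockstep.
theorem foldB_some (l : List String) : ∀ (sw : String),
    l.foldl pvStepB (some sw) = some (l.foldl pvStepA sw) := by
  induction l with
  | nil => intro sw; rfl
  | cons w t ih =>
    intro sw
    rw [List.foldl_cons, List.foldl_cons, pvStepA_eq]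
    by_cases h : pvQualifies w
    · by_cases h2 : PySem.Str.len sw < PySem.Str.len w
      · have hs : pvStepB (some sw) w = some w := by
          unfold pvStepB
          rw [if_pos h]
          show (if PySem.Str.len sw < PySem.Str.len w then some w else some sw) = some w
          exact if_pos h2
        rw [hs, if_pos h, if_pos h2, ih]
      · have hs : pvStepB (some sw) w = some sw := by
          unfold pvStepB
          rw [if_pos h]
          show (if PySem.Str.len sw < PySem.Str.len w then some w else some sw) = some sw
          exact if_neg h2
        rw [hs, if_pos h, if_neg h2, ih]
    · have hs : pvStepB (some sw) w = some sw := by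
        unfold pvStepB
        exact if_neg h
      rw [hs, if_neg h, ih]

-- The loop's result is at least as long as the accumulator it started from.
theorem foldA_len_mono (l : List String) : ∀ (sw : String),
    PySem.Str.len sw ≤ PySem.Str.len (l.foldl pvStepA sw) := by
  induction l with
  | nil => intro sw; simp
  | cons w t ih =>
    intro sw
    rw [List.foldl_cons, pvStepA_eq]
    split_ifs with h1 h2
    · exact le_trans (le_of_lt h2) (ih w)
    · exact ih sw
    · exact ih sw

-- From the empty-string start, A's fold matches the fused fold (none start).
theorem foldA_empty (l : List String) :
    l.foldl pvStepA "" = match l.foldl pvStepB none with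
                         | some m => m
                         | none => "" := by
  induction l with
  | nil => rfl
  | cons w t ih =>
    rw [List.foldl_cons, List.foldl_cons, pvStepA_eq]
    by_cases h : pvQualifies w
    · have hw : pvStepB none w = some w := by simp [pvStepB, h]
      have hlen := pvQualifies_len h
      rw [hw, foldB_some]
      simp only [h, if_true, len_empty]
      rw [if_pos hlen]
    · have hw : pvStepB none w = none := by simp [pvStepB, h]
      rw [hw]
      simp only [h, Bool.false_eq_true, if_false, ih]

-- If the fused fold from none yields some m, then m is nonempty.
theorem foldB_some_ne_empty (l : List String) {m : String}
    (h : l.foldl pvStepB none = some m) : m ≠ "" := by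
  induction l with
  | nil => simp at h
  | cons w t ih =>
    rw [List.foldl_cons] at h
    by_cases hq : pvQualifies w
    · rw [show pvStepB none w = some w by simp [pvStepB, hq]] at h
      rw [foldB_some] at h
      injection h with h
      have h1 := pvQualifies_len hq
      have h2 := foldA_len_mono t w
      intro hm
      rw [hm] at h
      rw [h, len_empty] at h2
      omega
    · rw [show pvStepB none w = none by simp [pvStepB, hq]] at h
      exact ih h

-- ===== VERDICT (by name: the statement is the Claim_ definition above) =====
theorem get_longest_word_final_e_spec : Claim_equal_get_longest_word_final_e := by
  intro words _ _
  unfold Spec_get_longest_word_final_e get_longest_word_final_e_alt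
  rw [sorted_find_eq_foldB]
  show (if words.foldl pvStepA "" = "" then "Not Found" else words.foldl pvStepA "") = _
  rw [foldA_empty]
  cases h : words.foldl pvStepB none with
  | none => simp
  | some m => simp [foldB_some_ne_empty words h]
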